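-- pv_equiv track=rewrite | github.com/Sentinelfortune/sentinelfortune | bot/services/email_intake_service.py | classify_desk
-- ===== SOURCE A (Python) =====
-- _DESK_SIGNALS: dict[str, frozenset] = {
--     "legal": frozenset({
--         "legal", "nda", "contract", "counsel", "lawyer", "attorney",
--         "litigation", "dispute", "compliance", "regulation", "gdpr",
--         "law", "jurisdiction", "sue", "court",
--     }),
--     "investor": frozenset({
--         "invest", "investor", "investment", "fund", "funding", "capital",
--         "equity", "stake", "shareholder", "venture capital", "vc",
--         "due diligence", "term sheet", "valuation",
--     }),
--     "licensing": frozenset({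
--         "license", "licensing", "licens", "rights", "royalty", "royalties",
--         "ip", "intellectual property", "trademark", "patent", "adapt",
--         "adaptation",
--     }),
--     "oem": frozenset({
--         "oem", "manufacturing", "manufacture", "factory", "produce",
--         "supplier", "white label", "whitelabel", "supply chain", "contract",
--         "production", "fabricat",
--     }),
-- }
--
-- def classify_desk(text: str) -> str:
--     """
--     Classify user text into one of the 5 desks.
--     Returns 'contact' as the safe default.
--     """
--     lower = text.lower()
--     words = set(lower.split())
--
--     for desk_id in ("legal", "investor", "licensing", "oem"):
--         signals = _DESK_SIGNALS[desk_id]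
--         if words & signals or any(s in lower for s in signals if " " in s):
--             return desk_id
--
--     return "contact"
-- ===== SOURCE B (Python) =====
-- # Same classification via a precomputed inverted index (signal -> highest-priority desk)
-- # plus a phrase list, scanned in one pass instead of four per-desk set intersections.
--
-- _DESK_TABLE = [
--     ("legal", [
--         "legal", "nda", "contract", "counsel", "lawyer", "attorney",
--         "litigation", "dispute", "compliance", "regulation", "gdpr",
--         "law", "jurisdiction", "sue", "court",
--     ]),
--     ("investor", [
--         "invest", "investor", "investment", "fund", "funding", "capital",
--         "equity", "stake", "shareholder", "venture capital", "vc",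
--         "due diligence", "term sheet", "valuation",
--     ]),
--     ("licensing", [
--         "license", "licensing", "licens", "rights", "royalty", "royalties",
--         "ip", "intellectual property", "trademark", "patent", "adapt",
--         "adaptation",
--     ]),
--     ("oem", [
--         "oem", "manufacturing", "manufacture", "factory", "produce",
--         "supplier", "white label", "whitelabel", "supply chain", "contract",
--         "production", "fabricat",
--     ]),
-- ]
--
-- # signal -> index of the earliest (highest-priority) desk containing it;
-- # multi-word signals additionally get a substring scan.
-- _SIGNAL_DESK = {}
-- _PHRASES = []
-- for _i, (_desk, _signals) in enumerate(_DESK_TABLE):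
--     for _s in _signals:
--         if _s not in _SIGNAL_DESK:
--             _SIGNAL_DESK[_s] = _i
--         if " " in _s:
--             _PHRASES.append((_s, _i))
--
-- _DESK_NAMES = ["legal", "investor", "licensing", "oem", "contact"]
--
--
-- def classify_desk(text: str) -> str:
--     """
--     Classify user text into one of the 5 desks.
--     Returns 'contact' as the safe default.
--     """
--     lower = text.lower()
--     best = 4
--     for w in lower.split():
--         p = _SIGNAL_DESK.get(w, 4)
--         if p < best:
--             best = p
--     for phrase, i in _PHRASES:
--         if i < best and phrase in lower:
--             best = i
--     return _DESK_NAMES[best]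
-- ===== Notes on version B (the rewrite author's own statement) =====
-- stated objective: alternative
-- what changed: A intersects the word set with each of four desk signal sets in priority order with an early return; B precomputes once an inverted index (signal word -> earliest desk index) plus a (phrase, desk) list, then makes one pass over the words and one over the phrases keeping the minimum desk index, finally mapping the index to the desk name.
import Mathlib
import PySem

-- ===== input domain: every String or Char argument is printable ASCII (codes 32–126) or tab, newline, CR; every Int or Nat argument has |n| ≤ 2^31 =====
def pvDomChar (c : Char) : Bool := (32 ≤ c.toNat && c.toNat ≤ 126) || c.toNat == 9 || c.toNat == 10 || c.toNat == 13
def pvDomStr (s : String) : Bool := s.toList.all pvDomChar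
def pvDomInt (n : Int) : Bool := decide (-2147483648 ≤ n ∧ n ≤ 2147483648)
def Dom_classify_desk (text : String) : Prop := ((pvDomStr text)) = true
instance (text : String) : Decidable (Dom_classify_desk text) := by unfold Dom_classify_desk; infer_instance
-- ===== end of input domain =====

-- B replaces A's four per-desk set intersections by a precomputed inverted index
-- (signal word -> highest-priority desk) plus a phrase list, scanned in one pass (objective: alternative).

-- ===== PORT A =====
-- _DESK_SIGNALS (the frozensets are only intersected / iterated with `any`, so PySem.Set is exact)
def pvDeskSignals : PySem.Dict String (PySem.Set String) :=
  PySem.Dict.ofList [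
    ("legal", PySem.Set.ofList [
        "legal", "nda", "contract", "counsel", "lawyer", "attorney",
        "litigation", "dispute", "compliance", "regulation", "gdpr",
        "law", "jurisdiction", "sue", "court"]),
    ("investor", PySem.Set.ofList [
        "invest", "investor", "investment", "fund", "funding", "capital",
        "equity", "stake", "shareholder", "venture capital", "vc",
        "due diligence", "term sheet", "valuation"]),
    ("licensing", PySem.Set.ofList [
        "license", "licensing", "licens", "rights", "royalty", "royalties",
        "ip", "intellectual property", "trademark", "patent", "adapt",
        "adaptation"]),
    ("oem", PySem.Set.ofList [
        "oem", "manufacturing", "manufacture", "factory", "produce",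
        "supplier", "white label", "whitelabel", "supply chain", "contract",
        "production", "fabricat"])]

-- the `for desk_id in (...)` loop with its early `return`
def pvDeskLoop (lower : String) (words : PySem.Set String) : List String → String
  | [] => "contact"
  | desk_id :: rest =>
    let signals := pvDeskSignals.getD desk_id PySem.Set.empty
    if !(PySem.Set.inter words signals).isEmpty
       || signals.any (fun s => PySem.Str.isIn " " s && PySem.Str.isIn s lower)
    then desk_id
    else pvDeskLoop lower words rest

def classify_desk (text : String) : String :=
  let lower := PySem.Str.lower text
  let words := PySem.Set.ofList (PySem.Str.split₀ lower)
  pvDeskLoop lower words ["legal", "investor", "licensing", "oem"]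

-- ===== PORT B =====
def pvDeskTable : List (String × List String) := [
    ("legal", [
        "legal", "nda", "contract", "counsel", "lawyer", "attorney",
        "litigation", "dispute", "compliance", "regulation", "gdpr",
        "law", "jurisdiction", "sue", "court"]),
    ("investor", [
        "invest", "investor", "investment", "fund", "funding", "capital",
        "equity", "stake", "shareholder", "venture capital", "vc",
        "due diligence", "term sheet", "valuation"]),
    ("licensing", [
        "license", "licensing", "licens", "rights", "royalty", "royalties",
        "ip", "intellectual property", "trademark", "patent", "adapt",
        "adaptation"]),
    ("oem", [
        "oem", "manufacturing", "manufacture", "factory", "produce",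
        "supplier", "white label", "whitelabel", "supply chain", "contract",
        "production", "fabricat"])]

-- the module-level build loop: (_SIGNAL_DESK, _PHRASES)
def pvIndex : PySem.Dict String Int × List (String × Int) :=
  (PySem.List.enumerate pvDeskTable).foldl (fun acc p =>
    p.2.2.foldl (fun acc s =>
      (if !acc.1.contains s then acc.1.insert s p.1 else acc.1,
       if PySem.Str.isIn " " s then acc.2 ++ [(s, p.1)] else acc.2)) acc)
    (PySem.Dict.empty, [])

def pvDeskNames : List String := ["legal", "investor", "licensing", "oem", "contact"]

def classify_desk_alt (text : String) : String :=
  let lower := PySem.Str.lower text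
  let best := (PySem.Str.split₀ lower).foldl (fun best w =>
    let p := pvIndex.1.getD w 4
    if p < best then p else best) 4
  let best := pvIndex.2.foldl (fun best pi =>
    if pi.2 < best && PySem.Str.isIn pi.1 lower then pi.2 else best) best
  PySem.List.pyGetD pvDeskNames best "contact"  -- best ∈ [0,4] always, so the index is in range

-- ===== PRECONDITION & SPEC =====
def Spec_classify_desk (text : String) (out : String) : Prop := out = classify_desk_alt text
instance (text : String) (out : String) : Decidable (Spec_classify_desk text out) := by unfold Spec_classify_desk; infer_instance

-- ===== CLAIM (what is proved, stated in full; the proofs are below) =====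
def Claim_equal_classify_desk : Prop := ∀ (text : String), Dom_classify_desk text → Spec_classify_desk text (classify_desk text)


-- ===== LEMMAS AND PROOFS =====

def pvL0 : List String := ["legal", "nda", "contract", "counsel", "lawyer", "attorney", "litigation", "dispute", "compliance", "regulation", "gdpr", "law", "jurisdiction", "sue", "court"]
def pvL1 : List String := ["invest", "investor", "investment", "fund", "funding", "capital", "equity", "stake", "shareholder", "venture capital", "vc", "due diligence", "term sheet", "valuation"]
def pvL2 : List String := ["license", "licensing", "licens", "rights", "royalty", "royalties", "ip", "intellectual property", "trademark", "patent", "adapt", "adaptation"]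
def pvL3 : List String := ["oem", "manufacturing", "manufacture", "factory", "produce", "supplier", "white label", "whitelabel", "supply chain", "contract", "production", "fabricat"]

lemma pvInnerProj (i : Int) :
    ∀ (L : List String) (acc : PySem.Dict String Int × List (String × Int)),
      L.foldl (fun acc s =>
          (if !acc.1.contains s then acc.1.insert s i else acc.1,
           if PySem.Str.isIn " " s then acc.2 ++ [(s, i)] else acc.2)) acc =
        (L.foldl (fun d s => if !d.contains s then d.insert s i else d) acc.1,
         L.foldl (fun ph s => if PySem.Str.isIn " " s then ph ++ [(s, i)] else ph) acc.2) := by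
  intro L
  induction L with
  | nil => intro acc; rfl
  | cons s L ih => intro acc; simp only [List.foldl_cons]; rw [ih]

lemma pvOuterProj :
    ∀ (tbl : List (Int × String × List String)) (acc : PySem.Dict String Int × List (String × Int)),
      tbl.foldl (fun acc p =>
          p.2.2.foldl (fun acc s =>
            (if !acc.1.contains s then acc.1.insert s p.1 else acc.1,
             if PySem.Str.isIn " " s then acc.2 ++ [(s, p.1)] else acc.2)) acc) acc =
        (tbl.foldl (fun d p => p.2.2.foldl (fun d s => if !d.contains s then d.insert s p.1 else d) d) acc.1,
         tbl.foldl (fun ph p => p.2.2.foldl (fun ph s => if PySem.Str.isIn " " s then ph ++ [(s, p.1)] else ph) ph) acc.2) := by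
  intro tbl
  induction tbl with
  | nil => intro acc; rfl
  | cons p tbl ih => intro acc; simp only [List.foldl_cons]; rw [pvInnerProj, ih]

lemma pvIndex_proj :
    pvIndex = ((PySem.List.enumerate pvDeskTable).foldl
                 (fun d p => p.2.2.foldl (fun d s => if !d.contains s then d.insert s p.1 else d) d)
                 PySem.Dict.empty,
               (PySem.List.enumerate pvDeskTable).foldl
                 (fun ph p => p.2.2.foldl (fun ph s => if PySem.Str.isIn " " s then ph ++ [(s, p.1)] else ph) ph)
                 []) := by
  unfold pvIndex
  exact pvOuterProj _ _

lemma pvIndex_snd : pvIndex.2 = [("venture capital", (1 : Int)), ("due diligence", (1 : Int)), ("term sheet", (1 : Int)), ("intellectual property", (2 : Int)), ("white label", (3 : Int)), ("supply chain", (3 : Int))] := by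
  rw [pvIndex_proj]
  rfl

-- setdefault-style insertion loop: lookup afterwards
lemma pvInnerGet? (i : Int) (L : List String) (w : String) :
    ∀ d : PySem.Dict String Int,
    (L.foldl (fun d s => if !d.contains s then d.insert s i else d) d).get? w =
      if w ∈ L ∧ d.contains w = false then some i else d.get? w := by
  induction L with
  | nil => intro d; simp
  | cons s L ih =>
    intro d
    simp only [List.foldl_cons]
    by_cases hc : d.contains s
    · simp only [hc, Bool.not_true, Bool.false_eq_true, if_false]
      rw [ih d]
      by_cases hw : w = s
      · subst hw; simp [hc]
      · simp [List.mem_cons, hw]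
    · simp only [Bool.not_eq_true] at hc
      simp only [hc, Bool.not_false, if_true]
      rw [ih (d.insert s i)]
      by_cases hw : w = s
      · subst hw
        simp [PySem.Dict.contains_insert_self, PySem.Dict.get?_insert_self, hc]
      · have hbe : (w == s) = false := by simp [hw]
        have hg : (d.insert s i).get? w = d.get? w := PySem.Dict.get?_insert_of_ne d i hw
        rw [PySem.Dict.contains_insert, hg]
        simp [List.mem_cons, hw, hbe]

-- first desk (by table order) whose signal list contains w
def pvFirst (w : String) : List (Int × String × List String) → Option Int
  | [] => none
  | p :: tbl => if w ∈ p.2.2 then some p.1 else pvFirst w tbl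

lemma pvChainGet? (w : String) :
    ∀ (tbl : List (Int × String × List String)) (d : PySem.Dict String Int),
      (tbl.foldl (fun d p => p.2.2.foldl (fun d s => if !d.contains s then d.insert s p.1 else d) d) d).get? w =
        if d.contains w = true then d.get? w else pvFirst w tbl := by
  intro tbl
  induction tbl with
  | nil =>
    intro d
    rw [PySem.Dict.contains_eq_isSome_get?]
    cases h : d.get? w <;> simp [List.foldl_nil, pvFirst, h]
  | cons p tbl ih =>
    intro d
    simp only [List.foldl_cons]
    rw [ih, pvFirst]
    have hi := pvInnerGet? p.1 p.2.2 w d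
    have hcont : (p.2.2.foldl (fun d s => if !d.contains s then d.insert s p.1 else d) d).contains w =
        ((p.2.2.foldl (fun d s => if !d.contains s then d.insert s p.1 else d) d).get? w).isSome :=
      PySem.Dict.contains_eq_isSome_get? _ _
    rw [hcont, hi]
    cases hget : d.get? w with
    | none =>
      have hd : d.contains w = false := by rw [PySem.Dict.contains_eq_isSome_get?, hget]; rfl
      by_cases hm : w ∈ p.2.2
      · simp [hm, hd, hget]
      · simp [hm, hd, hget]
    | some v =>
      have hd : d.contains w = true := by rw [PySem.Dict.contains_eq_isSome_get?, hget]; rfl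
      simp [hd, hget]

lemma pvDict_get? (w : String) :
    pvIndex.1.get? w = (if w ∈ pvL0 then some 0 else if w ∈ pvL1 then some 1 else
                        if w ∈ pvL2 then some 2 else if w ∈ pvL3 then some 3 else none) := by
  rw [pvIndex_proj]
  have he : PySem.List.enumerate pvDeskTable =
      [(0, ("legal", pvL0)), (1, ("investor", pvL1)), (2, ("licensing", pvL2)), (3, ("oem", pvL3))] := by decide
  simp only [he]
  rw [pvChainGet?]
  simp [pvFirst, PySem.Dict.contains_empty]

-- the word priority B's index assigns: the first desk whose signal list contains w, else 4
def pvPrio (w : String) : Int :=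
  if w ∈ pvL0 then 0 else if w ∈ pvL1 then 1 else if w ∈ pvL2 then 2 else if w ∈ pvL3 then 3 else 4

-- phrase disjunctions and A's per-desk match conditions, in clean form
abbrev pvP1 (lower : String) : Prop :=
  PySem.Str.isIn "venture capital" lower = true ∨ PySem.Str.isIn "due diligence" lower = true ∨
  PySem.Str.isIn "term sheet" lower = true
abbrev pvP2 (lower : String) : Prop := PySem.Str.isIn "intellectual property" lower = true
abbrev pvP3 (lower : String) : Prop :=
  PySem.Str.isIn "white label" lower = true ∨ PySem.Str.isIn "supply chain" lower = true
abbrev pvM0 (ws : List String) : Prop := ∃ w ∈ ws, w ∈ pvL0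
abbrev pvM1 (lower : String) (ws : List String) : Prop := (∃ w ∈ ws, w ∈ pvL1) ∨ pvP1 lower
abbrev pvM2 (lower : String) (ws : List String) : Prop := (∃ w ∈ ws, w ∈ pvL2) ∨ pvP2 lower
abbrev pvM3 (lower : String) (ws : List String) : Prop := (∃ w ∈ ws, w ∈ pvL3) ∨ pvP3 lower

lemma pvGetD_eq_prio (w : String) : pvIndex.1.getD w 4 = pvPrio w := by
  rw [PySem.Dict.getD_eq_get?_getD, pvDict_get?, pvPrio]
  by_cases h0 : w ∈ pvL0 <;> by_cases h1 : w ∈ pvL1 <;> by_cases h2 : w ∈ pvL2 <;> by_cases h3 : w ∈ pvL3 <;>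
    simp [h0, h1, h2, h3]

lemma pvPrio_nonneg (w : String) : 0 ≤ pvPrio w := by
  unfold pvPrio; split_ifs <;> omega

lemma pvPrio_le_zero (w : String) : pvPrio w ≤ 0 ↔ w ∈ pvL0 := by
  unfold pvPrio; split_ifs <;> simp_all <;> omega

lemma pvPrio_le_one (w : String) : pvPrio w ≤ 1 ↔ w ∈ pvL0 ∨ w ∈ pvL1 := by
  unfold pvPrio; split_ifs <;> simp_all <;> omega

lemma pvPrio_le_two (w : String) : pvPrio w ≤ 2 ↔ w ∈ pvL0 ∨ w ∈ pvL1 ∨ w ∈ pvL2 := by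
  unfold pvPrio; split_ifs <;> simp_all <;> omega

lemma pvPrio_le_three (w : String) : pvPrio w ≤ 3 ↔ w ∈ pvL0 ∨ w ∈ pvL1 ∨ w ∈ pvL2 ∨ w ∈ pvL3 := by
  unfold pvPrio; split_ifs <;> simp_all <;> omega

-- ---- fold characterisations ----
lemma pvWordFold_le (ws : List String) (k : Int) :
    ∀ b : Int, (ws.foldl (fun best w => let p := pvIndex.1.getD w 4; if p < best then p else best) b ≤ k) ↔
      b ≤ k ∨ ∃ w ∈ ws, pvPrio w ≤ k := by
  induction ws with
  | nil => intro b; simp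
  | cons w ws ih =>
    intro b
    rw [List.foldl_cons]
    have hstep : (let p := pvIndex.1.getD w 4; if p < b then p else b)
        = if pvPrio w < b then pvPrio w else b := by
      simp only [pvGetD_eq_prio]
    rw [hstep, ih]
    by_cases hp : pvPrio w < b
    · simp only [if_pos hp, List.mem_cons]
      constructor
      · rintro (h | ⟨x, hx, hq⟩)
        · exact Or.inr ⟨w, Or.inl rfl, h⟩
        · exact Or.inr ⟨x, Or.inr hx, hq⟩
      · rintro (h | ⟨x, hx, hq⟩)
        · exact Or.inl (by omega)
        · rcases hx with rfl | hx
          · exact Or.inl hq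
          · exact Or.inr ⟨x, hx, hq⟩
    · simp only [if_neg hp, List.mem_cons]
      constructor
      · rintro (h | ⟨x, hx, hq⟩)
        · exact Or.inl h
        · exact Or.inr ⟨x, Or.inr hx, hq⟩
      · rintro (h | ⟨x, hx, hq⟩)
        · exact Or.inl h
        · rcases hx with rfl | hx
          · exact Or.inl (by omega)
          · exact Or.inr ⟨x, hx, hq⟩

lemma pvWordFold_nonneg (ws : List String) :
    ∀ b : Int, 0 ≤ b →
      0 ≤ ws.foldl (fun best w => let p := pvIndex.1.getD w 4; if p < best then p else best) b := by
  induction ws with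
  | nil => intro b hb; simpa using hb
  | cons w ws ih =>
    intro b hb
    rw [List.foldl_cons]
    apply ih
    have hstep : (let p := pvIndex.1.getD w 4; if p < b then p else b)
        = if pvPrio w < b then pvPrio w else b := by
      simp only [pvGetD_eq_prio]
    rw [hstep]
    have := pvPrio_nonneg w
    split_ifs <;> omega

lemma pvPhraseFold_le (lower : String) (ps : List (String × Int)) (k : Int) :
    ∀ b : Int, (ps.foldl (fun best pi => if pi.2 < best && PySem.Str.isIn pi.1 lower then pi.2 else best) b ≤ k) ↔
      b ≤ k ∨ ∃ pi ∈ ps, PySem.Str.isIn pi.1 lower = true ∧ pi.2 ≤ k := by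
  induction ps with
  | nil => intro b; simp
  | cons pi ps ih =>
    intro b
    rw [List.foldl_cons]
    simp only [ih, List.mem_cons]
    constructor
    · rintro (h | ⟨x, hx, hh, hq⟩)
      · split_ifs at h with hc
        · simp only [Bool.and_eq_true, decide_eq_true_eq] at hc
          exact Or.inr ⟨pi, Or.inl rfl, hc.2, h⟩
        · exact Or.inl h
      · exact Or.inr ⟨x, Or.inr hx, hh, hq⟩
    · rintro (h | ⟨x, hx, hh, hq⟩)
      · split_ifs with hc
        · simp only [Bool.and_eq_true, decide_eq_true_eq] at hc
          exact Or.inl (by omega)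
        · exact Or.inl h
      · rcases hx with rfl | hx
        · split_ifs with hc
          · exact Or.inl hq
          · simp only [Bool.and_eq_true, decide_eq_true_eq, not_and, Bool.not_eq_true] at hc
            by_cases hlt : x.2 < b
            · rw [hc hlt] at hh; cases hh
            · exact Or.inl (by omega)
        · exact Or.inr ⟨x, hx, hh, hq⟩

lemma pvPhraseFold_nonneg (lower : String) (ps : List (String × Int)) (hps : ∀ pi ∈ ps, 0 ≤ pi.2) :
    ∀ b : Int, 0 ≤ b →
      0 ≤ ps.foldl (fun best pi => if pi.2 < best && PySem.Str.isIn pi.1 lower then pi.2 else best) b := by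
  induction ps with
  | nil => intro b hb; simpa using hb
  | cons pi ps ih =>
    intro b hb
    rw [List.foldl_cons]
    apply ih (fun x hx => hps x (List.mem_cons_of_mem _ hx))
    have := hps pi (by simp)
    split_ifs <;> omega

-- ---- A's conditions in clean form ----
lemma pvInterIff (ws : List String) (t : PySem.Set String) :
    ((!(PySem.Set.inter (PySem.Set.ofList ws) t).isEmpty) = true) ↔ ∃ w ∈ ws, w ∈ t := by
  rw [Bool.not_eq_eq_eq_not, Bool.not_true, List.isEmpty_eq_false_iff_exists_mem]
  constructor
  · rintro ⟨x, hx⟩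
    rw [PySem.Set.mem_inter _ _ _] at hx
    exact ⟨x, (PySem.Set.mem_ofList _ _).1 hx.1, hx.2⟩
  · rintro ⟨w, hw, ht⟩
    exact ⟨w, (PySem.Set.mem_inter _ _ _).2 ⟨(PySem.Set.mem_ofList _ _).2 hw, ht⟩⟩

lemma pvAny0 (lower : String) :
    ((PySem.Set.ofList pvL0).any (fun s => PySem.Str.isIn " " s && PySem.Str.isIn s lower)) = true ↔ False := by
  have h : PySem.Set.ofList pvL0 = pvL0 := by decide
  rw [h]
  simp only [pvL0, List.any_cons, List.any_nil, show (PySem.Str.isIn " " "legal") = false from by decide, show (PySem.Str.isIn " " "nda") = false from by decide, show (PySem.Str.isIn " " "contract") = false from by decide, show (PySem.Str.isIn " " "counsel") = false from by decide, show (PySem.Str.isIn " " "lawyer") = false from by decide, show (PySem.Str.isIn " " "attorney") = false from by decide, show (PySem.Str.isIn " " "litigation") = false from by decide, show (PySem.Str.isIn " " "dispute") = false from by decide, show (PySem.Str.isIn " " "compliance") = false from by decide, show (PySem.Str.isIn " " "regulation") = false from by decide, show (PySem.Str.isIn " " "gdpr") = false from by decide, show (PySem.Str.isIn " " "law") = false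 from by decide, show (PySem.Str.isIn " " "jurisdiction") = false from by decide, show (PySem.Str.isIn " " "sue") = false from by decide, show (PySem.Str.isIn " " "court") = false from by decide]
  simp

lemma pvAny1 (lower : String) :
    ((PySem.Set.ofList pvL1).any (fun s => PySem.Str.isIn " " s && PySem.Str.isIn s lower)) = true ↔ pvP1 lower := by
  have h : PySem.Set.ofList pvL1 = pvL1 := by decide
  rw [h, pvP1]
  simp only [pvL1, List.any_cons, List.any_nil, show (PySem.Str.isIn " " "invest") = false from by decide, show (PySem.Str.isIn " " "investor") = false from by decide, show (PySem.Str.isIn " " "investment") = false from by decide, show (PySem.Str.isIn " " "fund") = false from by decide, show (PySem.Str.isIn " " "funding") = false from by decide, show (PySem.Str.isIn " " "capital") = false from by decide, show (PySem.Str.isIn " " "equity") = false from by decide, show (PySem.Str.isIn " " "stake") = false from by decide, show (PySem.Str.isIn " " "shareholder") = false from by decide, show (PySem.Str.isIn " " "venture capital") = true from by decide, show (PySem.Str.isIn " " "vc") = false from by decide, show (PySem.Str.isIn " " "due diligence") = true from by decide, show (PySem.Str.isIn " " "term sheet") = true from by decide, show (PySem.Str.isIn " " "valuation") = false from by decide]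
  simp

lemma pvAny2 (lower : String) :
    ((PySem.Set.ofList pvL2).any (fun s => PySem.Str.isIn " " s && PySem.Str.isIn s lower)) = true ↔ pvP2 lower := by
  have h : PySem.Set.ofList pvL2 = pvL2 := by decide
  rw [h, pvP2]
  simp only [pvL2, List.any_cons, List.any_nil, show (PySem.Str.isIn " " "license") = false from by decide, show (PySem.Str.isIn " " "licensing") = false from by decide, show (PySem.Str.isIn " " "licens") = false from by decide, show (PySem.Str.isIn " " "rights") = false from by decide, show (PySem.Str.isIn " " "royalty") = false from by decide, show (PySem.Str.isIn " " "royalties") = false from by decide, show (PySem.Str.isIn " " "ip") = false from by decide, show (PySem.Str.isIn " " "intellectual property") = true from by decide, show (PySem.Str.isIn " " "trademark") = false from by decide, show (PySem.Str.isIn " " "patent") = false from by decide, show (PySem.Str.isIn " " "adapt") = false from by decide, show (PySem.Str.isIn " " "adaptation") = false from by decide]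
  simp

lemma pvAny3 (lower : String) :
    ((PySem.Set.ofList pvL3).any (fun s => PySem.Str.isIn " " s && PySem.Str.isIn s lower)) = true ↔ pvP3 lower := by
  have h : PySem.Set.ofList pvL3 = pvL3 := by decide
  rw [h, pvP3]
  simp only [pvL3, List.any_cons, List.any_nil, show (PySem.Str.isIn " " "oem") = false from by decide, show (PySem.Str.isIn " " "manufacturing") = false from by decide, show (PySem.Str.isIn " " "manufacture") = false from by decide, show (PySem.Str.isIn " " "factory") = false from by decide, show (PySem.Str.isIn " " "produce") = false from by decide, show (PySem.Str.isIn " " "supplier") = false from by decide, show (PySem.Str.isIn " " "white label") = true from by decide, show (PySem.Str.isIn " " "whitelabel") = false from by decide, show (PySem.Str.isIn " " "supply chain") = true from by decide, show (PySem.Str.isIn " " "contract") = false from by decide, show (PySem.Str.isIn " " "production") = false from by decide, show (PySem.Str.isIn " " "fabricat") = false from by decide]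
  simp

-- A's loop conditions, desk by desk
lemma pvCond0 (lower : String) (ws : List String) :
    ((!(PySem.Set.inter (PySem.Set.ofList ws) (PySem.Set.ofList pvL0)).isEmpty
      || (PySem.Set.ofList pvL0).any (fun s => PySem.Str.isIn " " s && PySem.Str.isIn s lower)) = true) ↔ pvM0 ws := by
  rw [Bool.or_eq_true, pvInterIff, pvAny0]
  simp [PySem.Set.mem_ofList]

lemma pvCond1 (lower : String) (ws : List String) :
    ((!(PySem.Set.inter (PySem.Set.ofList ws) (PySem.Set.ofList pvL1)).isEmpty
      || (PySem.Set.ofList pvL1).any (fun s => PySem.Str.isIn " " s && PySem.Str.isIn s lower)) = true) ↔ pvM1 lower ws := by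
  rw [Bool.or_eq_true, pvInterIff, pvAny1]
  simp [PySem.Set.mem_ofList]

lemma pvCond2 (lower : String) (ws : List String) :
    ((!(PySem.Set.inter (PySem.Set.ofList ws) (PySem.Set.ofList pvL2)).isEmpty
      || (PySem.Set.ofList pvL2).any (fun s => PySem.Str.isIn " " s && PySem.Str.isIn s lower)) = true) ↔ pvM2 lower ws := by
  rw [Bool.or_eq_true, pvInterIff, pvAny2]
  simp [PySem.Set.mem_ofList]

lemma pvCond3 (lower : String) (ws : List String) :
    ((!(PySem.Set.inter (PySem.Set.ofList ws) (PySem.Set.ofList pvL3)).isEmpty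
      || (PySem.Set.ofList pvL3).any (fun s => PySem.Str.isIn " " s && PySem.Str.isIn s lower)) = true) ↔ pvM3 lower ws := by
  rw [Bool.or_eq_true, pvInterIff, pvAny3]
  simp [PySem.Set.mem_ofList]


lemma pvSig0 : pvDeskSignals.getD "legal" PySem.Set.empty = PySem.Set.ofList pvL0 := by decide
lemma pvSig1 : pvDeskSignals.getD "investor" PySem.Set.empty = PySem.Set.ofList pvL1 := by decide
lemma pvSig2 : pvDeskSignals.getD "licensing" PySem.Set.empty = PySem.Set.ofList pvL2 := by decide
lemma pvSig3 : pvDeskSignals.getD "oem" PySem.Set.empty = PySem.Set.ofList pvL3 := by decide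

-- A's whole desk loop, evaluated to a chain of ifs on the per-desk match conditions
lemma pvAEval (lower : String) (ws : List String) :
    pvDeskLoop lower (PySem.Set.ofList ws) ["legal", "investor", "licensing", "oem"] =
      (if pvM0 ws then "legal" else if pvM1 lower ws then "investor" else
       if pvM2 lower ws then "licensing" else if pvM3 lower ws then "oem" else "contact") := by
  simp only [pvDeskLoop]
  rw [pvSig0, pvSig1, pvSig2, pvSig3]
  by_cases m0 : pvM0 ws
  · rw [if_pos ((pvCond0 lower ws).2 m0), if_pos m0]
  · rw [if_neg (fun h => m0 ((pvCond0 lower ws).1 h)), if_neg m0]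
    by_cases m1 : pvM1 lower ws
    · rw [if_pos ((pvCond1 lower ws).2 m1), if_pos m1]
    · rw [if_neg (fun h => m1 ((pvCond1 lower ws).1 h)), if_neg m1]
      by_cases m2 : pvM2 lower ws
      · rw [if_pos ((pvCond2 lower ws).2 m2), if_pos m2]
      · rw [if_neg (fun h => m2 ((pvCond2 lower ws).1 h)), if_neg m2]
        by_cases m3 : pvM3 lower ws
        · rw [if_pos ((pvCond3 lower ws).2 m3), if_pos m3]
        · rw [if_neg (fun h => m3 ((pvCond3 lower ws).1 h)), if_neg m3]

-- ---- main proof ----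
set_option maxHeartbeats 1600000 in
lemma pvMain (text : String) : classify_desk text = classify_desk_alt text := by
  simp only [classify_desk, classify_desk_alt]
  set lower := PySem.Str.lower text with hlow
  set ws := PySem.Str.split₀ lower with hws
  rw [pvAEval lower ws]
  set best1 := ws.foldl (fun best w => let p := pvIndex.1.getD w 4; if p < best then p else best) 4 with hb1
  set best2 := pvIndex.2.foldl (fun best pi => if pi.2 < best && PySem.Str.isIn pi.1 lower then pi.2 else best) best1 with hb2
  have h1le : ∀ k : Int, best1 ≤ k ↔ (4 : Int) ≤ k ∨ ∃ w ∈ ws, pvPrio w ≤ k := fun k => pvWordFold_le ws k 4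
  have h1nn : 0 ≤ best1 := pvWordFold_nonneg ws 4 (by omega)
  have hphr : ∀ pi ∈ pvIndex.2, (0:Int) ≤ pi.2 := by rw [pvIndex_snd]; decide
  have h2nn : 0 ≤ best2 := pvPhraseFold_nonneg lower pvIndex.2 hphr best1 h1nn
  have h2le : ∀ k : Int, best2 ≤ k ↔ best1 ≤ k ∨ ∃ pi ∈ pvIndex.2, PySem.Str.isIn pi.1 lower = true ∧ pi.2 ≤ k :=
    fun k => pvPhraseFold_le lower pvIndex.2 k best1
  rw [pvIndex_snd] at h2le
  simp only [List.mem_cons, List.not_mem_nil, or_false] at h2le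
  by_cases m0 : pvM0 ws
  · have hle : best2 ≤ 0 := by
      rw [h2le]
      refine Or.inl ((h1le 0).2 (Or.inr ?_))
      obtain ⟨w, hw, h0⟩ := m0
      exact ⟨w, hw, (pvPrio_le_zero w).2 h0⟩
    have hbest : best2 = 0 := le_antisymm hle h2nn
    rw [hbest, if_pos m0]
    decide
  · by_cases m1 : pvM1 lower ws
    · have hle : best2 ≤ 1 := by
        rw [h2le]
        rcases m1 with ⟨w, hw, h1⟩ | hp
        · exact Or.inl ((h1le 1).2 (Or.inr ⟨w, hw, (pvPrio_le_one w).2 (Or.inr h1)⟩))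
        · right
          rcases hp with h | h | h
          · exact ⟨("venture capital", 1), by simp, h, by norm_num⟩
          · exact ⟨("due diligence", 1), by simp, h, by norm_num⟩
          · exact ⟨("term sheet", 1), by simp, h, by norm_num⟩
      have hgt : ¬ best2 ≤ 0 := by
        rw [h2le]
        rintro (hb | ⟨pi, hpi, hh, hq⟩)
        · rw [h1le] at hb
          rcases hb with h4 | ⟨w, hw, hp⟩
          · omega
          · exact m0 ⟨w, hw, (pvPrio_le_zero w).1 hp⟩
        · rcases hpi with rfl | rfl | rfl | rfl | rfl | rfl <;> simp at hq
      have hbest : best2 = 1 := by omega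
      rw [hbest, if_neg m0, if_pos m1]
      decide
    · by_cases m2 : pvM2 lower ws
      · have hle : best2 ≤ 2 := by
          rw [h2le]
          rcases m2 with ⟨w, hw, h2⟩ | hp
          · exact Or.inl ((h1le 2).2 (Or.inr ⟨w, hw, (pvPrio_le_two w).2 (Or.inr (Or.inr h2))⟩))
          · exact Or.inr ⟨("intellectual property", 2), by simp, hp, by norm_num⟩
        have hgt : ¬ best2 ≤ 1 := by
          rw [h2le]
          rintro (hb | ⟨pi, hpi, hh, hq⟩)
          · rw [h1le] at hb
            rcases hb with h4 | ⟨w, hw, hp⟩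
            · omega
            · rcases (pvPrio_le_one w).1 hp with h | h
              · exact m0 ⟨w, hw, h⟩
              · exact m1 (Or.inl ⟨w, hw, h⟩)
          · rcases hpi with rfl | rfl | rfl | rfl | rfl | rfl
            · exact m1 (Or.inr (Or.inl hh))
            · exact m1 (Or.inr (Or.inr (Or.inl hh)))
            · exact m1 (Or.inr (Or.inr (Or.inr hh)))
            · simp at hq
            · simp at hq
            · simp at hq
        have hbest : best2 = 2 := by omega
        rw [hbest, if_neg m0, if_neg m1, if_pos m2]
        decide
      · by_cases m3 : pvM3 lower ws
        · have hle : best2 ≤ 3 := by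
            rw [h2le]
            rcases m3 with ⟨w, hw, h3⟩ | hp
            · exact Or.inl ((h1le 3).2 (Or.inr ⟨w, hw, (pvPrio_le_three w).2 (Or.inr (Or.inr (Or.inr h3)))⟩))
            · rcases hp with h | h
              · exact Or.inr ⟨("white label", 3), by simp, h, by norm_num⟩
              · exact Or.inr ⟨("supply chain", 3), by simp, h, by norm_num⟩
          have hgt : ¬ best2 ≤ 2 := by
            rw [h2le]
            rintro (hb | ⟨pi, hpi, hh, hq⟩)
            · rw [h1le] at hb
              rcases hb with h4 | ⟨w, hw, hp⟩
              · omega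
              · rcases (pvPrio_le_two w).1 hp with h | h | h
                · exact m0 ⟨w, hw, h⟩
                · exact m1 (Or.inl ⟨w, hw, h⟩)
                · exact m2 (Or.inl ⟨w, hw, h⟩)
            · rcases hpi with rfl | rfl | rfl | rfl | rfl | rfl
              · exact m1 (Or.inr (Or.inl hh))
              · exact m1 (Or.inr (Or.inr (Or.inl hh)))
              · exact m1 (Or.inr (Or.inr (Or.inr hh)))
              · exact m2 (Or.inr hh)
              · simp at hq
              · simp at hq
          have hbest : best2 = 3 := by omega
          rw [hbest, if_neg m0, if_neg m1, if_neg m2, if_pos m3]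
          decide
        · have hle : best2 ≤ 4 := by
            rw [h2le]
            exact Or.inl ((h1le 4).2 (Or.inl (le_refl _)))
          have hgt : ¬ best2 ≤ 3 := by
            rw [h2le]
            rintro (hb | ⟨pi, hpi, hh, hq⟩)
            · rw [h1le] at hb
              rcases hb with h4 | ⟨w, hw, hp⟩
              · omega
              · rcases (pvPrio_le_three w).1 hp with h | h | h | h
                · exact m0 ⟨w, hw, h⟩
                · exact m1 (Or.inl ⟨w, hw, h⟩)
                · exact m2 (Or.inl ⟨w, hw, h⟩)
                · exact m3 (Or.inl ⟨w, hw, h⟩)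
            · rcases hpi with rfl | rfl | rfl | rfl | rfl | rfl
              · exact m1 (Or.inr (Or.inl hh))
              · exact m1 (Or.inr (Or.inr (Or.inl hh)))
              · exact m1 (Or.inr (Or.inr (Or.inr hh)))
              · exact m2 (Or.inr hh)
              · exact m3 (Or.inr (Or.inl hh))
              · exact m3 (Or.inr (Or.inr hh))
          have hbest : best2 = 4 := by omega
          rw [hbest, if_neg m0, if_neg m1, if_neg m2, if_neg m3]
          decide

-- ===== VERDICT (by name: the statement is the Claim_ definition above) =====
theorem classify_desk_spec : Claim_equal_classify_desk := by
  intro text _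
  unfold Spec_classify_desk
  exact pvMain text
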